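-- pv_equiv track=rewrite | github.com/alg-bug-engineer/chitu_tt | chitu/moe/load_balancer/large_scale_balancer.py | assign_groups_contiguous
-- ===== SOURCE A (Python) =====
-- def assign_groups_contiguous(N, M):
--     base = N // M
--     remainder = N % M
--
--     groups = []
--     for i in range(M):
--         count = base + (1 if i < remainder else 0)
--         groups.extend([i] * count)
--
--     return groups
-- ===== SOURCE B (Python) =====
-- def assign_groups_contiguous(N, M):
--     base = N // M
--     remainder = N % M
--     cut = remainder * (base + 1)
--     out = []
--     for j in range(N):
--         if j < cut:
--             out.append(j // (base + 1))
--         else: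
--             out.append(remainder + (j - cut) // base)
--     return out
-- ===== Notes on version B (the rewrite author's own statement) =====
-- stated objective: alternative
-- what changed: Replaces the loop over M groups that extends the result with run-lists by a single pass over the N output positions computing each group id arithmetically from base and remainder.
-- outside the precondition, e.g. on assign_groups_contiguous(5, -2): A returns [], B returns [0, -1, -1, -2, -2]
import Mathlib
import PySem

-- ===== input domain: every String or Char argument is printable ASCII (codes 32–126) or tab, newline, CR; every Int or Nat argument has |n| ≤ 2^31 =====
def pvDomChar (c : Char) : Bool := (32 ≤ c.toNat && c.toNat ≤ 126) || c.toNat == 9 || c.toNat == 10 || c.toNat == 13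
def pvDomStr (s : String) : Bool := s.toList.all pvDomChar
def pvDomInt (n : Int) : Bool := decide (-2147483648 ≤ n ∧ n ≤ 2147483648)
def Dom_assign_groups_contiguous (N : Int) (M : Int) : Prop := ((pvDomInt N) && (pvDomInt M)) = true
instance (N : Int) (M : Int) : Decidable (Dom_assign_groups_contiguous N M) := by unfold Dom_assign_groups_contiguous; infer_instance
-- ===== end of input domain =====

-- B replaces A's per-group extend loop by one pass over output positions computing each group id arithmetically (alternative decomposition; Pre_ restricts to M > 0: M = 0 raises, and for M < 0 A's empty result is an accident of range over a negative count).


-- ===== PORT A =====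
def assign_groups_contiguous (N : Int) (M : Int) : List Int :=
  let base := PySem.Int.floordiv N M
  let remainder := PySem.Int.mod N M
  (PySem.List.pyRange 0 M 1).foldl
    (fun groups i => groups ++ List.replicate (base + (if i < remainder then 1 else 0)).toNat i) []

-- ===== PORT B =====
def assign_groups_contiguous_alt (N : Int) (M : Int) : List Int :=
  let base := PySem.Int.floordiv N M
  let remainder := PySem.Int.mod N M
  let cut := remainder * (base + 1)
  (PySem.List.pyRange 0 N 1).foldl
    (fun out j => out ++ [if j < cut then PySem.Int.floordiv j (base + 1)
                          else remainder + PySem.Int.floordiv (j - cut) base]) []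

-- ===== PRECONDITION & SPEC =====
-- Pre_ excludes M = 0, where A raises ZeroDivisionError, and M < 0, where A's empty
-- result is an accident of iterating range over a negative group count.
def Pre_assign_groups_contiguous (N : Int) (M : Int) : Prop := 0 < M
instance (N : Int) (M : Int) : Decidable (Pre_assign_groups_contiguous N M) := by
  unfold Pre_assign_groups_contiguous; infer_instance
def pvWitness_assign_groups_contiguous : Int × Int := (5, 3)
def Spec_assign_groups_contiguous (N : Int) (M : Int) (out : List Int) : Prop := out = assign_groups_contiguous_alt N M
instance (N : Int) (M : Int) (out : List Int) : Decidable (Spec_assign_groups_contiguous N M out) := by unfold Spec_assign_groups_contiguous; infer_instance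

-- ===== CLAIM (what is proved, stated in full; the proofs are below) =====
def Claim_equal_assign_groups_contiguous : Prop := ∀ (N : Int) (M : Int), Dom_assign_groups_contiguous N M → Pre_assign_groups_contiguous N M → Spec_assign_groups_contiguous N M (assign_groups_contiguous N M)

-- ===== LEMMAS AND PROOFS =====

-- One block of c copies of lo, read off as floor division of the positions [lo*c, (lo+1)*c).
theorem pv_chunk (c lo : Int) (hc : 0 < c) :
    (PySem.List.pyRange (lo * c) ((lo + 1) * c) 1).map (fun j => PySem.Int.floordiv j c) =
      List.replicate c.toNat lo := by
  rw [List.eq_replicate_iff]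
  constructor
  · rw [List.length_map, PySem.List.length_pyRange_one]
    congr 1; ring_nf
  · intro x hx
    rcases List.mem_map.mp hx with ⟨j, hj, rfl⟩
    rcases (PySem.List.mem_pyRange_one).mp hj with ⟨h1, h2⟩
    rw [PySem.Int.floordiv_eq_iff_of_pos hc]
    exact ⟨h1, h2⟩

-- Runs of constant length c over consecutive group ids equal the floor-division readout.
theorem pv_runs (c : Int) (hc : 0 < c) : ∀ (n : Nat) (lo : Int),
    (PySem.List.pyRange lo (lo + n) 1).flatMap (fun i => List.replicate c.toNat i) =
      (PySem.List.pyRange (lo * c) ((lo + n) * c) 1).map (fun j => PySem.Int.floordiv j c) := by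
  intro n
  induction n with
  | zero =>
    intro lo
    simp [PySem.List.pyRange_one_eq_nil]
  | succ n ih =>
    intro lo
    have hlt : lo < lo + (n + 1 : Nat) := by push_cast; omega
    rw [PySem.List.pyRange_one_cons hlt, List.flatMap_cons]
    have hsplit : PySem.List.pyRange (lo * c) ((lo + (n + 1 : Nat)) * c) 1 =
        PySem.List.pyRange (lo * c) ((lo + 1) * c) 1 ++
          PySem.List.pyRange ((lo + 1) * c) ((lo + (n + 1 : Nat)) * c) 1 := by
      refine PySem.List.pyRange_one_append _ _ _ (by nlinarith) (by nlinarith [Int.natCast_nonneg n])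
    rw [hsplit, List.map_append, pv_chunk c lo hc]
    have := ih (lo + 1)
    have harg : lo + 1 + (n : Int) = lo + ((n + 1 : Nat) : Int) := by push_cast; ring
    rw [harg] at this
    rw [this]

-- rewrite B's foldl into a map over the range
theorem pv_alt_eq_map (N M : Int) :
    assign_groups_contiguous_alt N M =
      (PySem.List.pyRange 0 N 1).map (fun j =>
        if j < PySem.Int.mod N M * (PySem.Int.floordiv N M + 1)
        then PySem.Int.floordiv j (PySem.Int.floordiv N M + 1)
        else PySem.Int.mod N M + PySem.Int.floordiv (j - PySem.Int.mod N M * (PySem.Int.floordiv N M + 1)) (PySem.Int.floordiv N M)) := by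
  unfold assign_groups_contiguous_alt
  rw [PySem.List.foldl_append_singleton_eq_map]
  simp

theorem pv_A_eq_flatMap (N M : Int) :
    assign_groups_contiguous N M =
      (PySem.List.pyRange 0 M 1).flatMap (fun i =>
        List.replicate (PySem.Int.floordiv N M + (if i < PySem.Int.mod N M then 1 else 0)).toNat i) := by
  unfold assign_groups_contiguous
  rw [PySem.List.foldl_append_eq_flatMap]
  simp

theorem assign_groups_contiguous_main (N M : Int) (hM : 0 < M) :
    assign_groups_contiguous N M = assign_groups_contiguous_alt N M := by
  set b := PySem.Int.floordiv N M with hb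
  set r := PySem.Int.mod N M with hr
  have hsum : b * M + r = N := PySem.Int.floordiv_mul_add_mod N M
  have hr0 : 0 ≤ r := PySem.Int.mod_nonneg N hM
  have hrM : r < M := PySem.Int.mod_lt N hM
  rw [pv_A_eq_flatMap, pv_alt_eq_map]
  rw [← hb, ← hr]
  rcases (show N ≤ 0 ∨ 0 < N by omega) with hN | hN
  · -- all counts are ≤ 0 and the range over N is empty: both sides are []
    have hbneg : b + 1 ≤ 0 ∨ b = 0 := by
      rcases (show b < 0 ∨ 0 ≤ b by omega) with h | h
      · left; omega
      · right
        by_contra hne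
        have hb1 : 1 ≤ b := by omega
        have : M ≤ b * M := le_mul_of_one_le_left (le_of_lt hM) hb1
        linarith
    rw [PySem.List.pyRange_one_eq_nil hN, List.map_nil, List.flatMap_eq_nil_iff]
    intro i hi
    have hi0 : 0 ≤ i := ((PySem.List.mem_pyRange_one).mp hi).1
    have hrz : b = 0 → r = 0 := by
      intro h0
      rw [h0] at hsum
      omega
    have hz : (b + (if i < r then 1 else 0)).toNat = 0 := by
      rcases hbneg with h | h
      · split <;> omega
      · have := hrz h; split <;> omega
    rw [hz, List.replicate_zero]
  · have hb0 : 0 ≤ b := by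
      by_contra hneg
      have hb1 : b ≤ -1 := by omega
      have : b * M ≤ -1 * M := mul_le_mul_of_nonneg_right hb1 (le_of_lt hM)
      linarith
    -- split groups at r and positions at cut = r*(b+1)
    have hcut0 : 0 ≤ r * (b + 1) := by positivity
    have hcutN : r * (b + 1) ≤ N := by nlinarith
    rw [PySem.List.pyRange_one_append 0 r M hr0 (le_of_lt hrM),
        PySem.List.pyRange_one_append 0 (r * (b + 1)) N hcut0 hcutN,
        List.flatMap_append, List.map_append]
    congr 1
    · -- first r groups, each of size b+1
      have hfirst : ∀ i ∈ PySem.List.pyRange 0 r 1,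
          List.replicate (b + (if i < r then 1 else 0)).toNat i = List.replicate (b + 1).toNat i := by
        intro i hi
        rcases (PySem.List.mem_pyRange_one).mp hi with ⟨_, h2⟩
        rw [if_pos h2]
      rw [List.flatMap_congr hfirst]
      have hmapf : (PySem.List.pyRange 0 (r * (b + 1)) 1).map
            (fun j => if j < r * (b + 1) then PySem.Int.floordiv j (b + 1)
                      else r + PySem.Int.floordiv (j - r * (b + 1)) b) =
          (PySem.List.pyRange 0 (r * (b + 1)) 1).map (fun j => PySem.Int.floordiv j (b + 1)) := by
        apply List.map_congr_left
        intro j hj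
        rcases (PySem.List.mem_pyRange_one).mp hj with ⟨_, h2⟩
        rw [if_pos h2]
      rw [hmapf]
      have hruns := pv_runs (b + 1) (by omega) r.toNat 0
      rw [Int.toNat_of_nonneg hr0] at hruns
      simpa using hruns
    · -- groups r..M-1, each of size b
      have hsecond : ∀ i ∈ PySem.List.pyRange r M 1,
          List.replicate (b + (if i < r then 1 else 0)).toNat i = List.replicate b.toNat i := by
        intro i hi
        rcases (PySem.List.mem_pyRange_one).mp hi with ⟨h1, _⟩
        rw [if_neg (by omega), add_zero]
      rw [List.flatMap_congr hsecond]
      rcases (show 0 = b ∨ 0 < b by omega) with hbz | hbpos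
      · -- b = 0: both segments are empty (cut = N)
        have hb0' : b = 0 := hbz.symm
        have hNr : r = N := by
          rw [hb0'] at hsum
          simpa using hsum
        have hcutEq : r * (b + 1) = N := by rw [hb0']; simpa using hNr
        rw [hcutEq, PySem.List.pyRange_one_eq_nil (le_refl N), List.map_nil,
            List.flatMap_eq_nil_iff]
        intro i _
        rw [hb0']
        simp
      · -- b > 0: runs of size b, shifted readout
        have hrun := pv_runs b hbpos (M - r).toNat r
        have hMr : r + ((M - r).toNat : Int) = M := by
          rw [Int.toNat_of_nonneg (by omega)]
          ring
        rw [hMr] at hrun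
        rw [hrun]
        rw [PySem.List.pyRange_one, PySem.List.pyRange_one, List.map_map, List.map_map]
        have hlen : (M * b - r * b).toNat = (N - r * (b + 1)).toNat := by
          have heq : M * b - r * b = N - r * (b + 1) := by nlinarith
          rw [heq]
        rw [hlen]
        apply List.map_congr_left
        intro k hk
        have hk' := List.mem_range.mp hk
        simp only [Function.comp]
        rw [if_neg (by omega)]
        have h1 : r * (b + 1) + (k : Int) - r * (b + 1) = (k : Int) := by ring
        rw [h1]
        have h2 : r * b + (k : Int) = (k : Int) + r * b := by ring
        rw [h2, PySem.Int.floordiv_eq_ediv_of_pos hbpos, PySem.Int.floordiv_eq_ediv_of_pos hbpos,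
            Int.add_mul_ediv_right _ _ (by omega : b ≠ 0)]
        ring

-- ===== VERDICT (by name: the statement is the Claim_ definition above) =====
theorem assign_groups_contiguous_spec : Claim_equal_assign_groups_contiguous := by
  intro N M _ hPre
  exact assign_groups_contiguous_main N M hPre
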